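-- pv_equiv track=rewrite | github.com/lodhikhubaib/IR---Boolean_Model | main.py | execute_proximity_query
-- ===== SOURCE A (Python) =====
-- def execute_proximity_query(positional_index, term1, term2, k):
--     # Check if both terms exist in the positional index
--     if term1 not in positional_index or term2 not in positional_index:
--         return []
--
--     # Initialize result list to store matching document IDs
--     result = []
--
--     # Iterate through documents containing both terms
--     for doc_id in positional_index[term1]:
--         if doc_id in positional_index[term2]:
--             positions_term1 = positional_index[term1][doc_id]
--             positions_term2 = positional_index[term2][doc_id]
--
--             # Check for proximity between terms
--             for pos1 in positions_term1:
--                 for pos2 in positions_term2: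
--                     if abs(pos1 - pos2) <= k:
--                         result.append(doc_id)
--                         break  # Break inner loop if proximity condition is met
--                 if doc_id in result:
--                     break  # Break outer loop if document already added to result
--
--     return result
-- ===== SOURCE B (Python) =====
-- def execute_proximity_query(positional_index, term1, term2, k):
--     postings1 = positional_index.get(term1)
--     postings2 = positional_index.get(term2)
--     if postings1 is None or postings2 is None:
--         return []
--     result = []
--     for doc_id, pos1 in postings1.items():
--         pos2 = postings2.get(doc_id)
--         if pos2 is None:
--             continue
--         a = sorted(pos1)
--         b = sorted(pos2)
--         i = j = 0
--         while i < len(a) and j < len(b):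
--             if abs(a[i] - b[j]) <= k:
--                 result.append(doc_id)
--                 break
--             if a[i] < b[j]:
--                 i += 1
--             else:
--                 j += 1
--     return result
-- ===== Notes on version B (the rewrite author's own statement) =====
-- stated objective: alternative
-- what changed: Replaces A's per-document all-pairs scan of the two position lists (with break/membership bookkeeping) by sorting both lists and a single two-pointer merge pass deciding within-k existence.
import Mathlib
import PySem

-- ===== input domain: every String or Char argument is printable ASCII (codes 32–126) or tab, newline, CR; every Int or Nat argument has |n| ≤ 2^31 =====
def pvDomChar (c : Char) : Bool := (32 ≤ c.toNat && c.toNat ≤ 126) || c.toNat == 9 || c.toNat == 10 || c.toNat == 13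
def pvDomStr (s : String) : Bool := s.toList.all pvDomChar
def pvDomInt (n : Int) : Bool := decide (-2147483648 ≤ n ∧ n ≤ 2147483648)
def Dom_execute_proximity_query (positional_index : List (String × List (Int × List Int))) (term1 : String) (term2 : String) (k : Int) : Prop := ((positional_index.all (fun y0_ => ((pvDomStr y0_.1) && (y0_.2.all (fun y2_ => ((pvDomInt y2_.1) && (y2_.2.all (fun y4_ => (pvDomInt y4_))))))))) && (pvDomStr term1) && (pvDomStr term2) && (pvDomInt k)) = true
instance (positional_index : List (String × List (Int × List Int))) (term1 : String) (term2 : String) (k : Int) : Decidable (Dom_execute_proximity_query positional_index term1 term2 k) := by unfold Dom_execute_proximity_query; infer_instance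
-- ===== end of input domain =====

-- B replaces A's per-document all-pairs position scan by sorting both position
-- lists and a single two-pointer merge pass (objective: alternative algorithm).

-- ===== PORT A =====
-- inner loop: 'for pos2 in positions_term2: if abs(pos1-pos2) <= k: result.append(doc_id); break'
def epqInner2 (p2 : List Int) (pos1 : Int) (k : Int) (doc : Int) (res : List Int) : List Int :=
  match p2 with
  | [] => res
  | b :: rest => if |pos1 - b| ≤ k then res ++ [doc] else epqInner2 rest pos1 k doc res

-- outer loop over positions_term1, with the 'if doc_id in result: break'
def epqInner1 (p1 : List Int) (p2 : List Int) (k : Int) (doc : Int) (res : List Int) : List Int :=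
  match p1 with
  | [] => res
  | a :: rest =>
    let res' := epqInner2 p2 a k doc res
    if res'.contains doc then res' else epqInner1 rest p2 k doc res'

-- 'for doc_id in positional_index[term1]': iterate the doc ids, look the position
-- lists up by key (first match), exactly as the Python subscripts do
def epqDocs (docs : List (Int × List Int)) (d1 : List (Int × List Int))
    (d2 : List (Int × List Int)) (k : Int) (res : List Int) : List Int :=
  match docs with
  | [] => res
  | (doc, _) :: rest =>
    if (List.lookup doc d2).isSome then
      epqDocs rest d1 d2 k
        (epqInner1 ((List.lookup doc d1).getD []) ((List.lookup doc d2).getD []) k doc res)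
    else epqDocs rest d1 d2 k res

def execute_proximity_query (positional_index : List (String × List (Int × List Int))) (term1 : String) (term2 : String) (k : Int) : List Int :=
  if (List.lookup term1 positional_index).isNone || (List.lookup term2 positional_index).isNone then []
  else
    epqDocs ((List.lookup term1 positional_index).getD [])
      ((List.lookup term1 positional_index).getD [])
      ((List.lookup term2 positional_index).getD []) k []

-- ===== PORT B =====
-- two-pointer merge over two sorted lists: is there a pair within distance k?
def tpClose (l1 : List Int) (l2 : List Int) (k : Int) : Bool :=
  match l1, l2 with
  | [], _ => false
  | _ :: _, [] => false
  | a :: as, b :: bs =>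
    if |a - b| ≤ k then true
    else if a < b then tpClose as (b :: bs) k
    else tpClose (a :: as) bs k
termination_by l1.length + l2.length

-- per-document check of Source B's while loop (sort both lists, then merge)
def bCheck (d2 : List (Int × List Int)) (k : Int) (dp : Int × List Int) : Option Int :=
  match List.lookup dp.1 d2 with
  | some p2 =>
    if tpClose (PySem.List.sorted dp.2 (fun x => x) false)
        (PySem.List.sorted p2 (fun x => x) false) k then some dp.1 else none
  | none => none

def execute_proximity_query_alt (positional_index : List (String × List (Int × List Int))) (term1 : String) (term2 : String) (k : Int) : List Int :=
  match List.lookup term1 positional_index, List.lookup term2 positional_index with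
  | some d1, some d2 => d1.filterMap (bCheck d2 k)
  | _, _ => []

-- ===== PRECONDITION & SPEC =====
-- Pre_ excludes association lists in which some posting dict has duplicate doc-id
-- keys: such lists do not represent a Python dict, and which of the duplicate
-- position lists is used is accidental.
def Pre_execute_proximity_query (positional_index : List (String × List (Int × List Int))) (term1 : String) (term2 : String) (k : Int) : Prop :=
  ∀ td ∈ positional_index, (td.2.map Prod.fst).Nodup
instance (positional_index : List (String × List (Int × List Int))) (term1 : String) (term2 : String) (k : Int) : Decidable (Pre_execute_proximity_query positional_index term1 term2 k) := by unfold Pre_execute_proximity_query; infer_instance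
def pvWitness_execute_proximity_query : (List (String × List (Int × List Int))) × String × String × Int :=
  ([("a", [(0, [0, 7]), (1, [2])]), ("b", [(0, [3])])], "a", "b", 3)

def Spec_execute_proximity_query (positional_index : List (String × List (Int × List Int))) (term1 : String) (term2 : String) (k : Int) (out : List Int) : Prop := out = execute_proximity_query_alt positional_index term1 term2 k
instance (positional_index : List (String × List (Int × List Int))) (term1 : String) (term2 : String) (k : Int) (out : List Int) : Decidable (Spec_execute_proximity_query positional_index term1 term2 k out) := by unfold Spec_execute_proximity_query; infer_instance

-- ===== CLAIM (what is proved, stated in full; the proofs are below) =====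
def Claim_equal_execute_proximity_query : Prop := ∀ (positional_index : List (String × List (Int × List Int))) (term1 : String) (term2 : String) (k : Int), Dom_execute_proximity_query positional_index term1 term2 k → Pre_execute_proximity_query positional_index term1 term2 k → Spec_execute_proximity_query positional_index term1 term2 k (execute_proximity_query positional_index term1 term2 k)

-- ===== LEMMAS AND PROOFS =====

theorem epqInner2_eq (p2 : List Int) (a k doc : Int) (res : List Int) :
    epqInner2 p2 a k doc res =
      if p2.any (fun b => decide (|a - b| ≤ k)) then res ++ [doc] else res := by
  induction p2 with
  | nil => simp [epqInner2]
  | cons b rest ih =>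
    simp only [epqInner2, List.any_cons]
    by_cases h : |a - b| ≤ k <;> simp [h, ih]

theorem epqInner1_eq (p1 p2 : List Int) (k doc : Int) (res : List Int) (h : doc ∉ res) :
    epqInner1 p1 p2 k doc res =
      if p1.any (fun a => p2.any (fun b => decide (|a - b| ≤ k))) then res ++ [doc] else res := by
  induction p1 with
  | nil => simp [epqInner1]
  | cons a rest ih =>
    rw [epqInner1, epqInner2_eq]
    by_cases hb : p2.any (fun b => decide (|a - b| ≤ k))
    · have hc : ((res ++ [doc]).contains doc) = true := by
        simp
      simp only [hb, if_true, List.any_cons, Bool.true_or]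
      rw [if_pos hc]
    · have hc : (res.contains doc) = false := by
        simpa using h
      have hb' : (p2.any fun b => decide (|a - b| ≤ k)) = false := eq_false_of_ne_true hb
      simp only [hb', Bool.false_eq_true, if_false, List.any_cons, Bool.false_or]
      rw [if_neg (by simp [h]), ih]

theorem tpClose_correct_aux (n : Nat) : ∀ (l1 l2 : List Int) (k : Int),
    l1.length + l2.length ≤ n → l1.Pairwise (· ≤ ·) → l2.Pairwise (· ≤ ·) →
    (tpClose l1 l2 k = true ↔ ∃ a ∈ l1, ∃ b ∈ l2, |a - b| ≤ k) := by
  induction n with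
  | zero =>
    intro l1 l2 k hn _ _
    cases l1 with
    | nil => simp [tpClose]
    | cons a as => simp at hn
  | succ n ih =>
    intro l1 l2 k hn h1 h2
    match l1, l2 with
    | [], l2 => simp [tpClose]
    | a :: as, [] => simp [tpClose]
    | a :: as, b :: bs =>
      rw [tpClose]
      by_cases hab : |a - b| ≤ k
      · rw [if_pos hab]
        constructor
        · intro _
          exact ⟨a, by simp, b, by simp, hab⟩
        · intro _; rfl
      · rw [if_neg hab]
        by_cases hlt : a < b
        · rw [if_pos hlt]
          rw [ih as (b :: bs) k (by simp at hn ⊢; omega) h1.of_cons h2]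
          constructor
          · rintro ⟨x, hx, y, hy, hxy⟩
            exact ⟨x, List.mem_cons_of_mem _ hx, y, hy, hxy⟩
          · rintro ⟨x, hx, y, hy, hxy⟩
            rcases List.mem_cons.1 hx with hxa | hx
            · exfalso
              have hby : b ≤ y := by
                rcases List.mem_cons.1 hy with hyb | hy'
                · exact hyb ▸ le_refl b
                · exact (List.pairwise_cons.1 h2).1 y hy'
              rw [abs_le] at hxy
              rw [abs_le] at hab
              subst hxa
              omega
            · exact ⟨x, hx, y, hy, hxy⟩
        · rw [if_neg hlt]
          rw [ih (a :: as) bs k (by simp at hn ⊢; omega) h1 h2.of_cons]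
          constructor
          · rintro ⟨x, hx, y, hy, hxy⟩
            exact ⟨x, hx, y, List.mem_cons_of_mem _ hy, hxy⟩
          · rintro ⟨x, hx, y, hy, hxy⟩
            rcases List.mem_cons.1 hy with hyb | hy
            · exfalso
              have hax : a ≤ x := by
                rcases List.mem_cons.1 hx with hxa | hx'
                · exact hxa ▸ le_refl a
                · exact (List.pairwise_cons.1 h1).1 x hx'
              rw [abs_le] at hxy
              rw [abs_le] at hab
              subst hyb
              omega
            · exact ⟨x, hx, y, hy, hxy⟩

theorem tpClose_correct (l1 l2 : List Int) (k : Int)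
    (h1 : l1.Pairwise (· ≤ ·)) (h2 : l2.Pairwise (· ≤ ·)) :
    tpClose l1 l2 k = true ↔ ∃ a ∈ l1, ∃ b ∈ l2, |a - b| ≤ k :=
  tpClose_correct_aux (l1.length + l2.length) l1 l2 k le_rfl h1 h2

theorem any_eq_tpClose_sorted (p1 p2 : List Int) (k : Int) :
    (p1.any fun a => p2.any fun b => decide (|a - b| ≤ k)) =
      tpClose (PySem.List.sorted p1 (fun x => x) false)
        (PySem.List.sorted p2 (fun x => x) false) k := by
  have hs1 : (PySem.List.sorted p1 (fun x => x) false).Pairwise (· ≤ ·) := by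
    simpa using PySem.List.sorted_pairwise (xs := p1) (key := fun x => x)
  have hs2 : (PySem.List.sorted p2 (fun x => x) false).Pairwise (· ≤ ·) := by
    simpa using PySem.List.sorted_pairwise (xs := p2) (key := fun x => x)
  rw [Bool.eq_iff_iff]
  rw [tpClose_correct _ _ _ hs1 hs2]
  simp [PySem.List.mem_sorted]

theorem lookup_mem {α β : Type} [BEq α] [LawfulBEq α] {l : List (α × β)} {a : α} {b : β}
    (h : List.lookup a l = some b) : (a, b) ∈ l := by
  induction l with
  | nil => simp [List.lookup] at h
  | cons p rest ih =>
    obtain ⟨x, y⟩ := p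
    by_cases he : a == x
    · simp only [List.lookup, he] at h
      have hax : a = x := eq_of_beq he
      simp only [Option.some.injEq] at h
      simp [hax, h]
    · simp only [List.lookup, he] at h
      exact List.mem_cons_of_mem _ (ih h)

theorem lookup_of_mem_nodup {l : List (Int × List Int)} {a : Int} {b : List Int}
    (hN : (l.map Prod.fst).Nodup) (h : (a, b) ∈ l) : List.lookup a l = some b := by
  induction l with
  | nil => simp at h
  | cons p rest ih =>
    simp only [List.map_cons, List.nodup_cons] at hN
    rcases List.mem_cons.1 h with h | h
    · subst h; simp [List.lookup]
    · have hne : (a == p.1) = false := by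
        apply beq_eq_false_iff_ne.2
        intro he
        exact hN.1 (he ▸ (List.mem_map.2 ⟨(a, b), h, rfl⟩))
      simp only [List.lookup, hne]
      exact ih hN.2 h

theorem epqDocs_eq (docs : List (Int × List Int)) (d1 d2 : List (Int × List Int)) (k : Int)
    (res : List Int)
    (hlk : ∀ dp ∈ docs, List.lookup dp.1 d1 = some dp.2)
    (hN : (docs.map Prod.fst).Nodup)
    (hres : ∀ dp ∈ docs, dp.1 ∉ res) :
    epqDocs docs d1 d2 k res = res ++ docs.filterMap (bCheck d2 k) := by
  induction docs generalizing res with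
  | nil => simp [epqDocs]
  | cons dp rest ih =>
    obtain ⟨doc, p1⟩ := dp
    simp only [List.map_cons, List.nodup_cons] at hN
    have hlk1 : List.lookup doc d1 = some p1 := hlk _ (List.mem_cons_self ..)
    rw [epqDocs]
    cases h2 : List.lookup doc d2 with
    | none =>
      simp only [Option.isSome_none, Bool.false_eq_true, if_false]
      rw [ih _ (fun dp h => hlk _ (List.mem_cons_of_mem _ h)) hN.2
        (fun dp h => hres _ (List.mem_cons_of_mem _ h))]
      simp [List.filterMap_cons, bCheck, h2]
    | some p2 =>
      simp only [h2, Option.isSome_some, if_pos rfl, hlk1, Option.getD_some]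
      have hdoc : doc ∉ res := hres _ (List.mem_cons_self ..)
      rw [epqInner1_eq _ _ _ _ _ hdoc]
      have hsortall := any_eq_tpClose_sorted p1 p2 k
      by_cases hc : p1.any fun a => p2.any fun b => decide (|a - b| ≤ k)
      · simp only [hc, if_pos rfl]
        rw [ih _ (fun dp h => hlk _ (List.mem_cons_of_mem _ h)) hN.2 ?_]
        · simp [List.filterMap_cons, bCheck, h2, ← hsortall, hc]
        · intro dp h hmem
          rcases List.mem_append.1 hmem with hmem | hmem
          · exact hres _ (List.mem_cons_of_mem _ h) hmem
          · rw [List.mem_singleton] at hmem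
            exact hN.1 (hmem ▸ List.mem_map.2 ⟨dp, h, rfl⟩)
      · have hc' : (p1.any fun a => p2.any fun b => decide (|a - b| ≤ k)) = false :=
          eq_false_of_ne_true hc
        simp only [hc', Bool.false_eq_true, if_false]
        rw [ih _ (fun dp h => hlk _ (List.mem_cons_of_mem _ h)) hN.2
          (fun dp h => hres _ (List.mem_cons_of_mem _ h))]
        simp [List.filterMap_cons, bCheck, h2, ← hsortall, hc]

-- ===== VERDICT (by name: the statement is the Claim_ definition above) =====
theorem execute_proximity_query_spec : Claim_equal_execute_proximity_query := by
  intro pi t1 t2 k _ hpre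
  unfold Spec_execute_proximity_query execute_proximity_query execute_proximity_query_alt
  cases h1 : List.lookup t1 pi with
  | none => simp [h1]
  | some d1 =>
    cases h2 : List.lookup t2 pi with
    | none => simp [h1, h2]
    | some d2 =>
      simp only [h1, h2, Option.isNone_some, Bool.or_self, Bool.false_eq_true, if_false,
        Option.getD_some]
      have hN : (d1.map Prod.fst).Nodup := hpre _ (lookup_mem h1)
      exact epqDocs_eq d1 d1 d2 k [] (fun dp h => lookup_of_mem_nodup hN h) hN (by simp)
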